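-- pv_equiv track=rewrite | github.com/ST3LL/Projet_PTS-DIA_13 | sudoku_grp.py | calc_dim
-- ===== SOURCE A (Python) =====
-- from typing import List, Optional, Set, Callable, Tuple, Dict, FrozenSet
--
-- Region_map = List[List[Optional[int]]]
--
-- def calc_dim(region_map: Region_map) -> int:
--     d_k = {}
--     for row in region_map:
--         for k in row:
--             d_k[k] = d_k[k] + 1 if k in d_k else 1
--     if None in d_k:
--         del d_k[None]
--     s_k = set(d_k.values())
--     assert len(s_k) == 1
--     dim = s_k.pop()
--     # assert dim <= 16
--     return dim
-- ===== SOURCE B (Python) =====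
-- def calc_dim(region_map):
--     vals = sorted(v for row in region_map for v in row if v is not None)
--     lens = set()
--     while vals:
--         x = vals[0]
--         run = 1
--         while run < len(vals) and vals[run] == x:
--             run += 1
--         lens.add(run)
--         vals = vals[run:]
--     assert len(lens) == 1
--     return lens.pop()
-- ===== Notes on version B (the rewrite author's own statement) =====
-- stated objective: alternative
-- what changed: B replaces A's dict-of-counts with flatten-filter-sort followed by a run-length scan over the sorted values, collecting run lengths into a set.
import Mathlib
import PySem

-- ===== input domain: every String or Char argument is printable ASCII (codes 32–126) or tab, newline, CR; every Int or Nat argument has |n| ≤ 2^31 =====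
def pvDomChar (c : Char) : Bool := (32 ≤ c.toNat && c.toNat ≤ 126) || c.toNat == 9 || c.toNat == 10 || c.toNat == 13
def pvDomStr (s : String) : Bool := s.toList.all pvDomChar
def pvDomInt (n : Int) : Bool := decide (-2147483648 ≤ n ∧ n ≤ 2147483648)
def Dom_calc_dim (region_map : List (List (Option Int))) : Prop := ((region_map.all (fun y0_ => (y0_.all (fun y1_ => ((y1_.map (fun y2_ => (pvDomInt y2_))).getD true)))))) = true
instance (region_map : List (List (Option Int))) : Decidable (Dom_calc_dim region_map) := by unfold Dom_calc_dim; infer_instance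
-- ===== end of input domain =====

-- B computes the uniform region size by sorting the non-None cells and run-length
-- scanning, instead of A's dictionary of per-key counts (objective: alternative).
-- On inputs where Python A raises AssertionError (no non-None cell, or unequal
-- value counts) B raises the same assertion; Pre_ excludes exactly those inputs.

-- ===== PORT A =====
def calc_dim (region_map : List (List (Option Int))) : Int :=
  let d_k : PySem.Dict (Option Int) Int :=
    region_map.foldl (fun d row =>
      row.foldl (fun d k =>
        d.insert k (if d.contains k then d.getD k 0 + 1 else 1)) d) PySem.Dict.empty
  let d_k := if d_k.contains none then d_k.erase none else d_k
  let s_k : PySem.Set Int := PySem.Set.ofList d_k.values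
  -- assert len(s_k) == 1; dim = s_k.pop()  (a one-element set pops its element;
  -- the assertion failure is excluded by Pre_, the port returns 0 there)
  match s_k with
  | [dim] => dim
  | _ => 0

-- ===== PORT B =====
-- the outer while loop of Source B: consume the run of the leading value, add its
-- length to the set, continue on the remaining suffix
def pvRuns (vals : List Int) (lens : PySem.Set Int) : PySem.Set Int :=
  match vals with
  | [] => lens
  | x :: xs =>
    pvRuns (xs.dropWhile (fun y => y == x))
      (PySem.Set.add lens (1 + ((xs.takeWhile (fun y => y == x)).length : Int)))
termination_by vals.length
decreasing_by
  simp only [List.length_cons]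
  exact Nat.lt_succ_of_le (List.length_dropWhile_le _ _)

def calc_dim_alt (region_map : List (List (Option Int))) : Int :=
  let vals : List Int :=
    PySem.List.sorted (region_map.flatMap (fun row => row.filterMap id)) (fun v => v) false
  let lens : PySem.Set Int := pvRuns vals PySem.Set.empty
  -- assert len(lens) == 1; return lens.pop() (the single element; the assertion
  -- failure is excluded by Pre_, the port returns 0 there)
  if lens.length = 1 then lens.headD 0 else 0

-- ===== PRECONDITION & SPEC =====
-- Pre_ excludes exactly the inputs on which A's assertion fails (AssertionError):
-- grids with no non-None cell, or whose non-None values do not all occur equally often.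
def Pre_calc_dim (region_map : List (List (Option Int))) : Prop :=
  let vs := (region_map.flatten).filterMap id
  vs ≠ [] ∧ ∀ x ∈ vs, vs.count x = vs.count (vs.headD 0)
instance (region_map : List (List (Option Int))) : Decidable (Pre_calc_dim region_map) := by unfold Pre_calc_dim; infer_instance

def pvWitness_calc_dim : List (List (Option Int)) := [[some 1, some 2, none], [some 2, some 1]]

def Spec_calc_dim (region_map : List (List (Option Int))) (out : Int) : Prop := out = calc_dim_alt region_map
instance (region_map : List (List (Option Int))) (out : Int) : Decidable (Spec_calc_dim region_map out) := by unfold Spec_calc_dim; infer_instance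

-- ===== CLAIM (what is proved, stated in full; the proofs are below) =====
def Claim_equal_calc_dim : Prop := ∀ (region_map : List (List (Option Int))), Dom_calc_dim region_map → Pre_calc_dim region_map → Spec_calc_dim region_map (calc_dim region_map)

-- ===== LEMMAS AND PROOFS =====

-- a nonempty duplicate-free list of equal values is the singleton
theorem pv_eq_singleton {l : List Int} {c : Int} (hne : l ≠ []) (hnd : l.Nodup)
    (hall : ∀ x ∈ l, x = c) : l = [c] := by
  cases l with
  | nil => exact absurd rfl hne
  | cons a t =>
    have ha : a = c := hall a List.mem_cons_self
    cases t with
    | nil => simp [ha]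
    | cons b t' =>
      have hb : b = c := hall b (by simp)
      exact absurd (by simp [ha, hb] : a ∈ b :: t') (List.nodup_cons.mp hnd).1

-- counting in the filterMap is counting the `some` in the original list
theorem pv_count_some (l : List (Option Int)) (v : Int) :
    (l.filterMap id).count v = l.count (some v) := by
  rw [List.count_filterMap]
  simp [List.count]

-- flatMap of per-row filterMap is filterMap of the flatten
theorem pv_vs (rm : List (List (Option Int))) :
    rm.flatMap (fun row => row.filterMap id) = (rm.flatten).filterMap id := by
  induction rm with
  | nil => rfl
  | cons r t ih => rw [List.flatMap_cons, List.flatten_cons, List.filterMap_append, ih]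

-- Set.ofList of a nonempty constant list is the singleton
theorem pv_ofList_const {l : List Int} {c : Int} (hne : l ≠ []) (hall : ∀ x ∈ l, x = c) :
    PySem.Set.ofList l = [c] := by
  apply pv_eq_singleton _ (PySem.Set.nodup_ofList l)
  · intro x hx
    exact hall x ((PySem.Set.mem_ofList _ _).mp hx)
  · intro hnil
    cases l with
    | nil => exact hne rfl
    | cons a t =>
      have : a ∈ PySem.Set.ofList (a :: t) := (PySem.Set.mem_ofList _ _).mpr (by simp)
      simp [hnil] at this

theorem pv_A_side (rm : List (List (Option Int))) {c : Int}
    (h : Pre_calc_dim rm) (hc : c = (((rm.flatten).filterMap id).count (((rm.flatten).filterMap id).headD 0) : Int)) :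
    calc_dim rm = c := by
  obtain ⟨hne, hcnt⟩ := h
  simp only [calc_dim]
  -- step 1: the fold builds the counter of the flattened keys
  have hfold : (rm.foldl (fun d row =>
      row.foldl (fun d k =>
        d.insert k (if d.contains k then d.getD k 0 + 1 else 1)) d) PySem.Dict.empty)
      = PySem.Dict.counter rm.flatten := by
    rw [← List.foldl_flatten]
    have hbody : (fun (d : PySem.Dict (Option Int) Int) k =>
        d.insert k (if d.contains k then d.getD k 0 + 1 else 1))
        = (fun d k => d.insert k (d.getD k 0 + 1)) := by
      funext d k
      by_cases hk : d.contains k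
      · simp [hk]
      · simp [hk, PySem.Dict.getD_of_not_contains]
    rw [hbody]
    exact PySem.Dict.foldl_insert_getD_add_one_eq_counter rm.flatten
  rw [hfold]
  -- step 2: the values after (conditionally) deleting None
  have hvalues : (if (PySem.Dict.counter rm.flatten).contains none
        then (PySem.Dict.counter rm.flatten).erase none else PySem.Dict.counter rm.flatten).values
      = ((PySem.Set.ofList rm.flatten).filter (fun k => !(k == none))).map
          (fun k => ((rm.flatten.count k : Nat) : Int)) := by
    by_cases hn : (PySem.Dict.counter rm.flatten).contains none
    · simp only [hn, if_true]
      show ((PySem.Dict.counter rm.flatten).erase none).items.map (·.2) = _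
      rw [show ((PySem.Dict.counter rm.flatten).erase none).items
          = (PySem.Dict.counter rm.flatten).items.filter (fun p => !(p.1 == none)) from rfl]
      rw [PySem.Dict.items_counter, List.filter_map]
      simp [Function.comp_def, List.map_map]
    · simp only [hn]
      have hnone : none ∉ rm.flatten := by
        rw [PySem.Dict.contains_counter] at hn
        simpa using hn
      have hfilter : (PySem.Set.ofList rm.flatten).filter (fun k => !(k == none))
          = PySem.Set.ofList rm.flatten := by
        apply List.filter_eq_self.mpr
        intro k hk
        have hkm := (PySem.Set.mem_ofList _ _).mp hk
        cases k with
        | none => exact absurd hkm hnone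
        | some v => simp
      rw [hfilter]
      show (PySem.Dict.counter rm.flatten).items.map (·.2) = _
      rw [PySem.Dict.items_counter]
      simp [List.map_map]
  rw [hvalues]
  -- step 3: that value list is nonempty and all-c, so its Set is [c]
  have hvne : ((PySem.Set.ofList rm.flatten).filter (fun k => !(k == none))).map
      (fun k => ((rm.flatten.count k : Nat) : Int)) ≠ [] := by
    cases hv : (rm.flatten).filterMap id with
    | nil => exact absurd hv hne
    | cons v t =>
      have hvmem : v ∈ (rm.flatten).filterMap id := by rw [hv]; simp
      obtain ⟨o, ho, hov⟩ := List.mem_filterMap.mp hvmem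
      have hsome : (some v) ∈ rm.flatten := by
        cases o with
        | none => simp at hov
        | some w => simp only [id] at hov; rwa [hov] at ho
      have hmem : (some v) ∈ (PySem.Set.ofList rm.flatten).filter (fun k => !(k == none)) :=
        List.mem_filter.mpr ⟨(PySem.Set.mem_ofList _ _).mpr hsome, by simp⟩
      intro hnil
      rw [List.map_eq_nil_iff.mp hnil] at hmem
      exact List.not_mem_nil hmem
  have hvall : ∀ x ∈ ((PySem.Set.ofList rm.flatten).filter (fun k => !(k == none))).map
      (fun k => ((rm.flatten.count k : Nat) : Int)), x = c := by
    intro x hx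
    obtain ⟨k, hk, hkx⟩ := List.mem_map.mp hx
    obtain ⟨hkmem, hknone⟩ := List.mem_filter.mp hk
    cases k with
    | none => simp at hknone
    | some v =>
      have hsome : (some v) ∈ rm.flatten := (PySem.Set.mem_ofList _ _).mp hkmem
      have hvmem : v ∈ (rm.flatten).filterMap id :=
        List.mem_filterMap.mpr ⟨some v, hsome, rfl⟩
      rw [← hkx, hc, ← pv_count_some, hcnt v hvmem]
  rw [pv_ofList_const hvne hvall]

-- Python's set.add never empties the set
theorem pv_add_ne_nil (s : PySem.Set Int) (x : Int) : PySem.Set.add s x ≠ [] := by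
  show (if s.contains x = true then s else s ++ [x]) ≠ []
  split
  · rename_i hcon
    intro hnil
    rw [hnil] at hcon
    simp [PySem.Set.contains] at hcon
  · simp

theorem pv_nodup_add (s : PySem.Set Int) (x : Int) (h : s.Nodup) : (PySem.Set.add s x).Nodup := by
  show (if s.contains x = true then s else s ++ [x]).Nodup
  split
  · exact h
  · rename_i hcon
    simp only [PySem.Set.contains, List.contains_eq_mem, decide_eq_true_eq] at hcon
    rw [List.nodup_append]
    refine ⟨h, List.nodup_singleton x, ?_⟩
    intro a ha b hb hab
    rw [List.mem_singleton] at hb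
    exact hcon ((hab.trans hb) ▸ ha)

theorem pv_pvRuns_ne_nil (ys : List Int) (lens : PySem.Set Int)
    (h : lens ≠ [] ∨ ys ≠ []) : pvRuns ys lens ≠ [] := by
  fun_induction pvRuns ys lens with
  | case1 lens => exact h.resolve_right (by simp)
  | case2 lens x xs ih => exact ih (Or.inl (pv_add_ne_nil _ _))

theorem pv_pvRuns_nodup (ys : List Int) (lens : PySem.Set Int)
    (h : lens.Nodup) : (pvRuns ys lens).Nodup := by
  fun_induction pvRuns ys lens with
  | case1 lens => exact h
  | case2 lens x xs ih => exact ih (pv_nodup_add _ _ h)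

-- in a sorted list, everything after the leading run of x is strictly greater
theorem pv_drop_gt {x : Int} : ∀ {xs : List Int}, (x :: xs).Pairwise (· ≤ ·) →
    ∀ v ∈ xs.dropWhile (fun y => y == x), x < v := by
  intro xs
  induction xs with
  | nil => simp
  | cons a t ih =>
    intro hp v hv
    rw [List.pairwise_cons] at hp
    obtain ⟨hxle, hat⟩ := hp
    by_cases ha : (a == x) = true
    · rw [List.dropWhile_cons, if_pos ha] at hv
      refine ih ?_ v hv
      rw [List.pairwise_cons]
      exact ⟨fun y hy => hxle y (by simp [hy]), hat.of_cons⟩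
    · rw [List.dropWhile_cons, if_neg ha] at hv
      have hxa : x < a := lt_of_le_of_ne (hxle a (by simp))
        (fun hxe => ha (beq_iff_eq.mpr hxe.symm))
      rcases List.mem_cons.mp hv with rfl | hvt
      · exact hxa
      · exact lt_of_lt_of_le hxa ((List.pairwise_cons.mp hat).1 v hvt)

-- the leading run length is the count of x, and later counts are unchanged
theorem pv_run_count {x : Int} {xs : List Int} (hp : (x :: xs).Pairwise (· ≤ ·)) :
    (x :: xs).count x = 1 + (xs.takeWhile (fun y => y == x)).length ∧
    ∀ v ∈ xs.dropWhile (fun y => y == x),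
      (x :: xs).count v = (xs.dropWhile (fun y => y == x)).count v := by
  have htake : ∀ y ∈ xs.takeWhile (fun y => y == x), y = x := by
    intro y hy
    exact eq_of_beq (List.mem_takeWhile_imp (p := fun y => y == x) hy)
  constructor
  · have hx0 : (xs.dropWhile (fun y => y == x)).count x = 0 := by
      rw [List.count_eq_zero]
      intro hmem
      exact absurd (pv_drop_gt hp x hmem) (lt_irrefl x)
    have hxt : (xs.takeWhile (fun y => y == x)).count x
        = (xs.takeWhile (fun y => y == x)).length :=
      List.count_eq_length.mpr (fun b hb => (htake b hb).symm)
    calc (x :: xs).count x = xs.count x + 1 := List.count_cons_self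
      _ = ((xs.takeWhile (fun y => y == x)) ++ (xs.dropWhile (fun y => y == x))).count x + 1 := by
          rw [List.takeWhile_append_dropWhile]
      _ = 1 + (xs.takeWhile (fun y => y == x)).length := by
          rw [List.count_append, hx0, hxt]; omega
  · intro v hv
    have hxv : x < v := pv_drop_gt hp v hv
    have hvt : (xs.takeWhile (fun y => y == x)).count v = 0 := by
      rw [List.count_eq_zero]
      intro hmem
      exact absurd (htake v hmem) (by intro h; rw [h] at hxv; exact lt_irrefl x hxv)
    calc (x :: xs).count v = xs.count v := by
          rw [List.count_cons_of_ne (by intro h; rw [h] at hxv; exact lt_irrefl v hxv)]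
      _ = ((xs.takeWhile (fun y => y == x)) ++ (xs.dropWhile (fun y => y == x))).count v := by
          rw [List.takeWhile_append_dropWhile]
      _ = (xs.dropWhile (fun y => y == x)).count v := by
          rw [List.count_append, hvt]; omega

-- every run length collected from a sorted list is the count of some member
theorem pv_pvRuns_mem (ys : List Int) (lens : PySem.Set Int)
    (hp : ys.Pairwise (· ≤ ·)) (r : Int) (hr : r ∈ pvRuns ys lens) :
    r ∈ lens ∨ ∃ v, v ∈ ys ∧ r = ((ys.count v : Nat) : Int) := by
  fun_induction pvRuns ys lens with
  | case1 lens => exact Or.inl hr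
  | case2 lens x xs ih =>
    have hpd : (xs.dropWhile (fun y => y == x)).Pairwise (· ≤ ·) :=
      hp.of_cons.sublist (List.dropWhile_sublist _)
    obtain ⟨hcx, hcrest⟩ := pv_run_count hp
    rcases ih hpd hr with hmem | ⟨v, hvmem, hvcnt⟩
    · rcases (PySem.Set.mem_add _ _ _).mp hmem with hl | hrun
      · exact Or.inl hl
      · refine Or.inr ⟨x, List.mem_cons_self, ?_⟩
        rw [hcx, hrun]
        push_cast
        ring
    · refine Or.inr ⟨v, List.mem_cons_of_mem x ((List.dropWhile_sublist _).mem hvmem), ?_⟩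
      rw [hcrest v hvmem, hvcnt]

theorem pv_B_side (rm : List (List (Option Int))) {c : Int}
    (h : Pre_calc_dim rm) (hc : c = (((rm.flatten).filterMap id).count (((rm.flatten).filterMap id).headD 0) : Int)) :
    calc_dim_alt rm = c := by
  obtain ⟨hne, hcnt⟩ := h
  simp only [calc_dim_alt]
  rw [pv_vs]
  have hperm : (PySem.List.sorted ((rm.flatten).filterMap id) (fun v => v) false).Perm
      ((rm.flatten).filterMap id) := PySem.List.sorted_perm _ _ _
  have hpair : (PySem.List.sorted ((rm.flatten).filterMap id) (fun v => v) false).Pairwise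
      (· ≤ ·) := PySem.List.sorted_pairwise ((rm.flatten).filterMap id) (fun v => v)
  have hyne : PySem.List.sorted ((rm.flatten).filterMap id) (fun v => v) false ≠ [] := by
    intro hnil
    exact hne ((PySem.List.sorted_eq_nil_iff _ _ _).mp hnil)
  have hlens : pvRuns (PySem.List.sorted ((rm.flatten).filterMap id) (fun v => v) false)
      PySem.Set.empty = [c] := by
    apply pv_eq_singleton
    · exact pv_pvRuns_ne_nil _ _ (Or.inr hyne)
    · exact pv_pvRuns_nodup _ _ List.nodup_nil
    · intro r hr
      rcases pv_pvRuns_mem _ _ hpair r hr with hmem | ⟨v, hvmem, hvcnt⟩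
      · exact absurd hmem (List.not_mem_nil)
      · rw [hvcnt, hperm.count_eq v, hc, hcnt v (hperm.mem_iff.mp hvmem)]
  rw [hlens]
  simp

-- ===== VERDICT (by name: the statement is the Claim_ definition above) =====
theorem calc_dim_spec : Claim_equal_calc_dim := by
  intro rm _ hpre
  unfold Spec_calc_dim
  rw [pv_A_side rm hpre rfl, pv_B_side rm hpre rfl]
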